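-- pv_equiv track=rewrite | github.com/biowpn/MinimalCFG | mincfg/mincfg.py | eliminate_long_rules
-- ===== SOURCE A (Python) =====
-- def get_min_non_terminal(G):
--     return min(nt for nt, _ in G)
--
-- def eliminate_long_rules(G):
--     '''
--     break down long rule:
--         A -> B1 B2 B3 B4
--     to short rules:
--         A -> B1 A1
--         A1 -> B2 A2
--         A2 -> B3 B4
--     '''
--     nt_new = get_min_non_terminal(G) - 1
--     G_out = []
--     for nt, subs in G:
--         if len(subs) > 2:
--             G_out.append((nt, [subs[0], nt_new]))
--             for a in subs[1:-2]:
--                 G_out.append((nt_new, [a, nt_new - 1]))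
--                 nt_new -= 1
--             G_out.append((nt_new, subs[-2:]))
--             nt_new -= 1
--         else:
--             G_out.append((nt, subs))
--     return G_out
-- ===== SOURCE B (Python) =====
-- def eliminate_long_rules(G):
--     '''
--     break down long rule:
--         A -> B1 B2 B3 B4
--     to short rules:
--         A -> B1 A1
--         A1 -> B2 A2
--         A2 -> B3 B4
--     '''
--     def binarize(nt, subs, nxt):
--         # returns (binary rules for nt -> subs, next fresh non-terminal)
--         if len(subs) <= 2:
--             return [(nt, subs)], nxt
--         rest, nxt2 = binarize(nxt, subs[1:], nxt - 1)
--         return [(nt, [subs[0], nxt])] + rest, nxt2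
--
--     nxt = min(nt for nt, _ in G) - 1
--     out = []
--     for nt, subs in G:
--         rules, nxt = binarize(nt, subs, nxt)
--         out.extend(rules)
--     return out
-- ===== Notes on version B (the rewrite author's own statement) =====
-- stated objective: alternative
-- what changed: A's imperative slice-and-mutate loop over each long right-hand side (append head rule, iterate over subs[1:-2] decrementing a shared counter, append the tail rule) is replaced by a recursive helper binarize(nt, subs, nxt) that peels one symbol off the RHS per call and returns the rule list together with the updated fresh-nonterminal counter, which the outer loop threads across rules.
-- outside the precondition, e.g. on eliminate_long_rules([]): A raises ValueError, B raises ValueError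
import Mathlib
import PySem

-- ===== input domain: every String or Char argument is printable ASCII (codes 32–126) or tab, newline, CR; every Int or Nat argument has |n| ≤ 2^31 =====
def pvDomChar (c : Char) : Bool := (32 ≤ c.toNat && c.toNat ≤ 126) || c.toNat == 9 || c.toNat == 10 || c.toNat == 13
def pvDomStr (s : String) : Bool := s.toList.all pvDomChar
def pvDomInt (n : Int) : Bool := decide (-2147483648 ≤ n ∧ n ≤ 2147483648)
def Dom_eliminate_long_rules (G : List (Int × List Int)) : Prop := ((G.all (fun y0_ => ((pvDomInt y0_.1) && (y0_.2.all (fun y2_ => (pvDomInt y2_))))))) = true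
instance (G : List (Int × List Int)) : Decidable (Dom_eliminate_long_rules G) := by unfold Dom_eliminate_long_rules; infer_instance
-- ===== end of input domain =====

-- B replaces A's imperative slice-and-mutate loop over each long RHS by a recursive
-- helper binarize over the RHS tail (alternative decomposition, same cost).

-- ===== PORT A =====
-- the body of A's 'for nt, subs in G' loop; state = (nt_new, G_out)
def pvStepA (st : Int × List (Int × List Int)) (r : Int × List Int) :
    Int × List (Int × List Int) :=
  if 2 < r.2.length then
    -- G_out.append((nt, [subs[0], nt_new]));  subs[0] exists since len(subs) > 2
    let g1 := st.2 ++ [(r.1, [(PySem.List.pyGet? r.2 0).getD 0, st.1])]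
    -- for a in subs[1:-2]: G_out.append((nt_new, [a, nt_new - 1])); nt_new -= 1
    let inner := (PySem.List.slice r.2 (some 1) (some (-2))).foldl
        (fun (q : Int × List (Int × List Int)) a => (q.1 - 1, q.2 ++ [(q.1, [a, q.1 - 1])]))
        (st.1, g1)
    -- G_out.append((nt_new, subs[-2:])); nt_new -= 1
    (inner.1 - 1, inner.2 ++ [(inner.1, PySem.List.slice r.2 (some (-2)) none)])
  else
    (st.1, st.2 ++ [(r.1, r.2)])

def eliminate_long_rules (G : List (Int × List Int)) : List (Int × List Int) :=
  match PySem.List.min? (G.map (fun p => p.1)) (fun x => x) with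
  | none => []    -- min() raises ValueError on empty G; excluded by Pre_
  | some m => (G.foldl pvStepA (m - 1, [])).2

-- ===== PORT B =====
-- binarize(nt, subs, nxt) -> (rules, next fresh non-terminal)
def pvBinarize (nt : Int) (subs : List Int) (nxt : Int) :
    List (Int × List Int) × Int :=
  match subs with
  | s0 :: s1 :: s2 :: rest =>
      let r := pvBinarize nxt (s1 :: s2 :: rest) (nxt - 1)
      ((nt, [s0, nxt]) :: r.1, r.2)
  | _ => ([(nt, subs)], nxt)    -- len(subs) <= 2

def eliminate_long_rules_alt (G : List (Int × List Int)) : List (Int × List Int) :=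
  match PySem.List.min? (G.map (fun p => p.1)) (fun x => x) with
  | none => []    -- min() raises ValueError on empty G; excluded by Pre_
  | some m =>
      (G.foldl (fun (p : List (Int × List Int) × Int) (r : Int × List Int) =>
          let br := pvBinarize r.1 r.2 p.2
          (p.1 ++ br.1, br.2)) ([], m - 1)).1

-- ===== PRECONDITION & SPEC =====
-- Pre_ excludes only the empty grammar, on which A (and B alike) raise ValueError from min().
def Pre_eliminate_long_rules (G : List (Int × List Int)) : Prop := G ≠ []
instance (G : List (Int × List Int)) : Decidable (Pre_eliminate_long_rules G) := by
  unfold Pre_eliminate_long_rules; infer_instance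

def pvWitness_eliminate_long_rules : (List (Int × List Int)) := [(0, [1, 2, 3, 4])]

def Spec_eliminate_long_rules (G : List (Int × List Int)) (out : List (Int × List Int)) : Prop := out = eliminate_long_rules_alt G
instance (G : List (Int × List Int)) (out : List (Int × List Int)) : Decidable (Spec_eliminate_long_rules G out) := by unfold Spec_eliminate_long_rules; infer_instance

-- ===== CLAIM (what is proved, stated in full; the proofs are below) =====
def Claim_equal_eliminate_long_rules : Prop := ∀ (G : List (Int × List Int)), Dom_eliminate_long_rules G → Pre_eliminate_long_rules G → Spec_eliminate_long_rules G (eliminate_long_rules G)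

-- ===== LEMMAS AND PROOFS =====

-- subs[1:-2] as drop/take, for 3 ≤ len
theorem slice_one_neg2 (xs : List Int) (h : 3 ≤ xs.length) :
    PySem.List.slice xs (some 1) (some (-2)) = xs.tail.take (xs.length - 3) := by
  simp [PySem.List.slice]
  rw [Nat.min_eq_left (by omega), List.drop_one]
  congr 1

-- A's long branch with the slices written as drop/take
theorem stepA_long (nt k : Int) (g : List (Int × List Int)) (s : List Int)
    (h : 3 ≤ s.length) :
    pvStepA (k, g) (nt, s) =
      (let inner := (s.tail.take (s.length - 3)).foldl
          (fun (q : Int × List (Int × List Int)) a => (q.1 - 1, q.2 ++ [(q.1, [a, q.1 - 1])]))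
          (k, g ++ [(nt, [(PySem.List.pyGet? s 0).getD 0, k])]);
       (inner.1 - 1, inner.2 ++ [(inner.1, s.drop (s.length - 2))])) := by
  rw [pvStepA, if_pos (show 2 < s.length by omega)]
  rw [slice_one_neg2 s h, PySem.List.slice_from_neg_ofNat s 2 (by omega)]

-- peeling the head symbol off a long rule reproduces A's step with the counter advanced
theorem pvStepA_unroll (s0 : Int) (tl : List Int) (hl : 2 ≤ tl.length)
    (k : Int) (g : List (Int × List Int)) (nt : Int) :
    pvStepA (k, g) (nt, s0 :: tl) = pvStepA (k - 1, g ++ [(nt, [s0, k])]) (k, tl) := by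
  rcases tl with _ | ⟨a, tl⟩; · simp at hl
  rcases tl with _ | ⟨b, tl⟩; · simp at hl
  cases tl with
  | nil =>
      simp [pvStepA, PySem.List.slice, PySem.List.pyGet?, PySem.List.pyIdx?]
  | cons c rest =>
      rw [stepA_long nt k g _ (by simp), stepA_long k (k-1) _ _ (by simp)]
      simp only [List.length_cons, List.tail_cons]
      rw [show rest.length + 1 + 1 + 1 + 1 - 3 = rest.length + 1 by omega,
          show rest.length + 1 + 1 + 1 - 3 = rest.length by omega,
          show rest.length + 1 + 1 + 1 + 1 - 2 = rest.length + 2 by omega,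
          show rest.length + 1 + 1 + 1 - 2 = rest.length + 1 by omega]
      simp [List.take_succ_cons, List.foldl_cons]

-- A's per-rule step is exactly binarize, appended to the accumulator
theorem pvStep_eq (subs : List Int) (nt k : Int) (g : List (Int × List Int)) :
    pvStepA (k, g) (nt, subs) = ((pvBinarize nt subs k).2, g ++ (pvBinarize nt subs k).1) := by
  induction subs generalizing nt k g with
  | nil => simp [pvStepA, pvBinarize]
  | cons s0 tl ih =>
      rcases tl with _ | ⟨s1, tl⟩
      · simp [pvStepA, pvBinarize]
      rcases tl with _ | ⟨s2, tl⟩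
      · simp [pvStepA, pvBinarize]
      rw [pvStepA_unroll s0 (s1 :: s2 :: tl) (by simp) k g nt, ih]
      simp [pvBinarize]

-- the two grammar folds carry the same state, with the pair components swapped
theorem pvFold_eq (G : List (Int × List Int)) (k : Int) (acc : List (Int × List Int)) :
    G.foldl pvStepA (k, acc) =
      ((G.foldl (fun (p : List (Int × List Int) × Int) (r : Int × List Int) =>
          let br := pvBinarize r.1 r.2 p.2
          (p.1 ++ br.1, br.2)) (acc, k)).2,
       (G.foldl (fun (p : List (Int × List Int) × Int) (r : Int × List Int) =>
          let br := pvBinarize r.1 r.2 p.2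
          (p.1 ++ br.1, br.2)) (acc, k)).1) := by
  induction G generalizing k acc with
  | nil => rfl
  | cons hd tlG ih =>
      simp only [List.foldl_cons]
      rw [pvStep_eq hd.2 hd.1 k acc]
      exact ih _ _

-- ===== VERDICT (by name: the statement is the Claim_ definition above) =====
theorem eliminate_long_rules_spec : Claim_equal_eliminate_long_rules := by
  intro G _ _
  unfold Spec_eliminate_long_rules eliminate_long_rules eliminate_long_rules_alt
  cases PySem.List.min? (G.map (fun p => p.1)) (fun x => x) with
  | none => rfl
  | some m => simp only [pvFold_eq]
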